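-- pv_equiv track=rewrite | github.com/AmaziiingChen/microflow | src/services/rule_generator.py | _merge_preview_image_urls
-- ===== SOURCE A (Python) =====
-- from typing import Dict, List, Optional, Any
--
-- def _merge_preview_image_urls(
--
--     primary: Optional[List[str]],
--     fallback: Optional[List[str]],
--     image_assets: Optional[List[Dict[str, Any]]] = None,
-- ) -> List[str]:
--     merged: List[str] = []
--     seen: set[str] = set()
--
--     for bucket in (primary or [], fallback or []):
--         if not isinstance(bucket, list):
--             continue
--         for value in bucket:
--             clean_value = str(value or "").strip()
--             if not clean_value or clean_value in seen:
--                 continue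
--             seen.add(clean_value)
--             merged.append(clean_value)
--
--     if isinstance(image_assets, list):
--         for item in image_assets:
--             if not isinstance(item, dict):
--                 continue
--             clean_value = str(item.get("url") or "").strip()
--             if not clean_value or clean_value in seen:
--                 continue
--             seen.add(clean_value)
--             merged.append(clean_value)
--
--     return merged
-- ===== SOURCE B (Python) =====
-- from typing import Dict, List, Optional, Any
--
--
-- def _merge_preview_image_urls(
--     primary: Optional[List[str]],
--     fallback: Optional[List[str]],
--     image_assets: Optional[List[Dict[str, Any]]] = None,
-- ) -> List[str]:
--     # Gather cleaned candidates with comprehensions, then keep each occurrence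
--     # only if it does not appear earlier in the list (prefix-membership dedup,
--     # no auxiliary seen-set state).
--     cands = [
--         cv
--         for bucket in (primary or [], fallback or [])
--         if isinstance(bucket, list)
--         for cv in (str(v or "").strip() for v in bucket)
--         if cv
--     ]
--     if isinstance(image_assets, list):
--         cands += [
--             cv
--             for item in image_assets
--             if isinstance(item, dict)
--             for cv in (str(item.get("url") or "").strip(),)
--             if cv
--         ]
--     return [c for i, c in enumerate(cands) if c not in cands[:i]]
-- ===== Notes on version B (the rewrite author's own statement) =====
-- stated objective: alternative
-- what changed: B gathers one flat cleaned candidate list with comprehensions and dedups by prefix membership (keep c at index i iff c not in cands[:i]), with no seen-set state, instead of A's single pass that threads a seen set through every loop; B trades A's O(n) set lookups for quadratic prefix scans.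
import Mathlib
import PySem

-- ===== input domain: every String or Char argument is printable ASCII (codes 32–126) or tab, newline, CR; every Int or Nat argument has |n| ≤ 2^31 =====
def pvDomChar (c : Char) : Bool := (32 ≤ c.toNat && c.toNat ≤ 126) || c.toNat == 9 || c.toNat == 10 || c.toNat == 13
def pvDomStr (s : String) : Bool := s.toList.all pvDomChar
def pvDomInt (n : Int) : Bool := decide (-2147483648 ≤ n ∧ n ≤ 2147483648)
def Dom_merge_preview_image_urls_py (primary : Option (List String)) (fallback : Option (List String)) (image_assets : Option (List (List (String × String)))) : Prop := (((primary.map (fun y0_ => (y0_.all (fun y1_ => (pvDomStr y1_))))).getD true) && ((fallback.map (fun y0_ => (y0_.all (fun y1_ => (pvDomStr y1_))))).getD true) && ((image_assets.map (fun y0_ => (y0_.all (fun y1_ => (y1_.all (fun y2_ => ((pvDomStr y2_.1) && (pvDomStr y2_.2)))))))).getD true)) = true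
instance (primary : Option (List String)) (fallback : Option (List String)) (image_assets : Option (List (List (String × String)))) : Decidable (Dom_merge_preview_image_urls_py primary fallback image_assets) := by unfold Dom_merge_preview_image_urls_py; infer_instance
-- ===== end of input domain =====

-- B gathers one flat cleaned candidate list by comprehensions and then dedups by keeping each
-- element only if it is absent from the prefix before it (no seen-set state); return values
-- proved equal to A's interleaved seen-set pass on Dom.

-- ===== PORT A =====
def merge_preview_image_urls_py (primary : Option (List String)) (fallback : Option (List String)) (image_assets : Option (List (List (String × String)))) : List String :=
  let stepBucket := fun (st : List String × PySem.Set String) (value : String) =>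
    let cv := PySem.Str.strip value
    if cv = "" ∨ PySem.Set.contains st.2 cv then st
    else (st.1 ++ [cv], PySem.Set.add st.2 cv)
  let st0 : List String × PySem.Set String := ([], PySem.Set.empty)
  let st1 := (primary.getD []).foldl stepBucket st0
  let st2 := (fallback.getD []).foldl stepBucket st1
  let st3 := match image_assets with
    | some items =>
        items.foldl (fun (st : List String × PySem.Set String) item =>
          let cv := PySem.Str.strip (((PySem.Dict.mk item).get? "url").getD "")
          if cv = "" ∨ PySem.Set.contains st.2 cv then st
          else (st.1 ++ [cv], PySem.Set.add st.2 cv)) st2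
    | none => st2
  st3.1

-- ===== PORT B =====
def merge_preview_image_urls_py_alt (primary : Option (List String)) (fallback : Option (List String)) (image_assets : Option (List (List (String × String)))) : List String :=
  let cands :=
    ((primary.getD []).map PySem.Str.strip).filter (fun c => c ≠ "")
    ++ ((fallback.getD []).map PySem.Str.strip).filter (fun c => c ≠ "")
    ++ (match image_assets with
        | some items =>
            (items.map (fun item => PySem.Str.strip (((PySem.Dict.mk item).get? "url").getD ""))).filter (fun c => c ≠ "")
        | none => [])
  -- [c for i, c in enumerate(cands) if c not in cands[:i]]
  ((PySem.List.enumerate cands 0).filter (fun p => !((PySem.List.slice cands none (some p.1)).contains p.2))).map (fun p => p.2)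

-- ===== PRECONDITION & SPEC =====
def Spec_merge_preview_image_urls_py (primary : Option (List String)) (fallback : Option (List String)) (image_assets : Option (List (List (String × String)))) (out : List String) : Prop := out = merge_preview_image_urls_py_alt primary fallback image_assets
instance (primary : Option (List String)) (fallback : Option (List String)) (image_assets : Option (List (List (String × String)))) (out : List String) : Decidable (Spec_merge_preview_image_urls_py primary fallback image_assets out) := by unfold Spec_merge_preview_image_urls_py; infer_instance

-- ===== CLAIM (what is proved, stated in full; the proofs are below) =====
def Claim_equal_merge_preview_image_urls_py : Prop := ∀ (primary : Option (List String)) (fallback : Option (List String)) (image_assets : Option (List (List (String × String)))), Dom_merge_preview_image_urls_py primary fallback image_assets → Spec_merge_preview_image_urls_py primary fallback image_assets (merge_preview_image_urls_py primary fallback image_assets)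

-- ===== LEMMAS AND PROOFS =====

-- the "new elements, in order" of folding Set.add over xs from seen-state s
def pvHelper : List String → List String → List String
  | [], _ => []
  | x :: xs, s => if x ∈ s then pvHelper xs s else x :: pvHelper xs (s ++ [x])

-- A's interleaved (merged, seen) fold keeps merged = seen and equals folding Set.add over the
-- cleaned, non-empty candidates.
theorem pvFoldA {α : Type} (f : α → String) (xs : List α) (m : List String) :
    xs.foldl (fun (st : List String × PySem.Set String) a =>
        let cv := f a
        if cv = "" ∨ PySem.Set.contains st.2 cv then st
        else (st.1 ++ [cv], PySem.Set.add st.2 cv)) (m, m)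
    = (((xs.map f).filter (fun c => c ≠ "")).foldl PySem.Set.add m,
       ((xs.map f).filter (fun c => c ≠ "")).foldl PySem.Set.add m) := by
  induction xs generalizing m with
  | nil => rfl
  | cons x xs ih =>
    simp only [List.foldl_cons, List.map_cons, List.filter_cons]
    by_cases h0 : f x = ""
    · simpa [h0] using ih m
    · by_cases hm : f x ∈ m
      · have hc : PySem.Set.contains m (f x) = true := (PySem.Set.contains_iff m (f x)).mpr hm
        have ha : PySem.Set.add m (f x) = m := by simp [PySem.Set.add, hm]
        simpa [h0, hc, hm, ha] using ih m
      · have hc : ¬ PySem.Set.contains m (f x) = true := fun h =>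
          hm ((PySem.Set.contains_iff m (f x)).mp h)
        have ha : PySem.Set.add m (f x) = m ++ [f x] := by simp [PySem.Set.add, hm]
        simpa [h0, hc, hm, ha] using ih (m ++ [f x])

theorem pvFoldAdd (xs s : List String) :
    xs.foldl PySem.Set.add s = s ++ pvHelper xs s := by
  induction xs generalizing s with
  | nil => simp [pvHelper]
  | cons x xs ih =>
    by_cases hm : x ∈ s
    · have ha : PySem.Set.add s x = s := by simp [PySem.Set.add, hm]
      simp [pvHelper, hm, ih]
    · have ha : PySem.Set.add s x = s ++ [x] := by simp [PySem.Set.add, hm]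
      simp [pvHelper, hm, ih]

-- B's prefix-membership filter over enumerate computes pvHelper, for any seen-state s with the
-- same members as the consumed prefix.
theorem pvFilterEq (xs : List String) : ∀ (pre s : List String), (∀ a, a ∈ pre ↔ a ∈ s) →
    ((PySem.List.enumerate xs (pre.length : Int)).filter
        (fun p => !((PySem.List.slice (pre ++ xs) none (some p.1)).contains p.2))).map (fun p => p.2)
      = pvHelper xs s := by
  induction xs with
  | nil => intro pre s h; simp [PySem.List.enumerate_nil, pvHelper]
  | cons x xs ih =>
    intro pre s h
    have hslice : PySem.List.slice (pre ++ x :: xs) none (some (pre.length : Int)) = pre := by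
      rw [PySem.List.slice_to_natCast]
      exact List.take_left
    have hrest : ∀ (p : Int × String),
        PySem.List.slice (pre ++ x :: xs) none (some p.1) = PySem.List.slice ((pre ++ [x]) ++ xs) none (some p.1) := by
      intro p; simp
    have hlen : ((pre ++ [x]).length : Int) = (pre.length : Int) + 1 := by
      simp
    by_cases hm : x ∈ s
    · have hmp : x ∈ pre := (h x).mpr hm
      have hcontains : pre.contains x = true := by simpa using hmp
      rw [PySem.List.enumerate_cons]
      simp only [List.filter_cons, hslice, hcontains, Bool.not_true, pvHelper, hm, if_pos]
      have := ih (pre ++ [x]) s (by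
        intro a
        constructor
        · intro ha
          rcases List.mem_append.mp ha with h1 | h2
          · exact (h a).mp h1
          · simp only [List.mem_singleton] at h2; rw [h2]; exact hm
        · intro ha; exact List.mem_append.mpr (Or.inl ((h a).mpr ha)))
      rw [hlen] at this
      rw [← this]
      congr 1
      apply List.filter_congr
      intro p hp
      rw [hrest p]
    · have hmp : x ∉ pre := fun hx => hm ((h x).mp hx)
      have hcontains : pre.contains x = false := by simpa using hmp
      rw [PySem.List.enumerate_cons]
      simp only [List.filter_cons, hslice, hcontains, Bool.not_false, pvHelper, if_neg hm, if_true]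
      have := ih (pre ++ [x]) (s ++ [x]) (by intro a; simp [h a])
      rw [hlen] at this
      simp only [List.map_cons]
      rw [← this]
      congr 2
      apply List.filter_congr
      intro p hp
      rw [hrest p]

theorem pvMain (cands : List String) :
    cands.foldl PySem.Set.add [] =
    ((PySem.List.enumerate cands 0).filter
        (fun p => !((PySem.List.slice cands none (some p.1)).contains p.2))).map (fun p => p.2) := by
  have h := pvFilterEq cands [] [] (fun a => Iff.rfl)
  simp only [List.length_nil, Nat.cast_zero, List.nil_append] at h
  rw [h, pvFoldAdd]
  simp

-- ===== VERDICT (by name: the statement is the Claim_ definition above) =====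
theorem merge_preview_image_urls_py_spec : Claim_equal_merge_preview_image_urls_py := by
  intro primary fallback image_assets _
  unfold Spec_merge_preview_image_urls_py merge_preview_image_urls_py merge_preview_image_urls_py_alt
  cases image_assets with
  | none =>
    simp only
    rw [show (([], PySem.Set.empty) : List String × PySem.Set String) = (([], []) : List String × PySem.Set String) from rfl]
    rw [pvFoldA PySem.Str.strip (primary.getD []) []]
    rw [pvFoldA PySem.Str.strip (fallback.getD [])]
    simp only [List.append_nil]
    rw [← List.foldl_append]
    exact pvMain _
  | some items =>
    simp only
    rw [show (([], PySem.Set.empty) : List String × PySem.Set String) = (([], []) : List String × PySem.Set String) from rfl]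
    rw [pvFoldA PySem.Str.strip (primary.getD []) []]
    rw [pvFoldA PySem.Str.strip (fallback.getD [])]
    rw [pvFoldA (fun item => PySem.Str.strip (((PySem.Dict.mk item).get? "url").getD ""))]
    simp only
    rw [← List.foldl_append, ← List.foldl_append, ← List.append_assoc]
    exact pvMain _
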